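-- pv_equiv track=rewrite | github.com/boxu0001/practice | py3/S1_2sum_closest.py | closestSum
-- ===== SOURCE A (Python) =====
-- def closestSum(mx, x, y):
--     result=[]
--     if not x or not y:
--         return result
--     sortKey = lambda i: i[1]
--     x.sort(key=sortKey)
--     y.sort(key=sortKey)
--
--     j = len(y)-1                                # inintialize
--     currentMx = None
--     for xi in x:                                # 思路是基于xi, 找到当前最优解， (xi, yj), 满足以下条件
--                                                 # 1. (xi， yj+1) 一定不满足， 2. Value(xi, yj) < Value(xi+1, yj)
--                                                 # 所以算法是让yj线性递减， xi线性增加， O(X+Y)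
--         xId, xValue = xi
--         while j >=0 and xValue+y[j][1] > mx:    # iterate b from right to left, find max(xValue+yValue) <= mx
--             j-=1
--         if j < 0:                               # we don't find any pairs
--             return result
--         yId, yValue = y[j]                      # we find a candidate pair
--         currentSum = xValue + yValue            #这里需要考虑最优解， currentMx是当前最优值，(注意 如果允许重复的值， 这里要用循环去找接下来可能重复的 Yj-1, Yj-2, .. == Yj )
--         if currentMx == None or currentSum == currentMx:    #如果等于当前最优值， 加到result list里
--             result+=[(xId, yId)]
--             currentMx = currentSum
--         elif currentSum > currentMx:                        #如果大于当前最优值， 整个result list要被替换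
--             result=[(xId, yId)]
--             currentMx = currentSum
--         else:                                               #小于的情况， 忽略
--             pass
--     return result
-- ===== SOURCE B (Python) =====
-- def closestSum(mx, x, y):
--     # binary-search variant; sorts x and y in place (same side effect as the original)
--     x.sort(key=lambda p: p[1])
--     y.sort(key=lambda p: p[1])
--     cands = []
--     for xId, xv in x:
--         lo, hi = 0, len(y)
--         while lo < hi:                      # lo = number of y's with xv + value <= mx
--             mid = (lo + hi) // 2
--             if xv + y[mid][1] > mx:
--                 hi = mid
--             else:
--                 lo = mid + 1
--         if lo == 0:                         # no partner for this (and any later) xi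
--             break
--         yId, yv = y[lo - 1]
--         cands.append((xv + yv, xId, yId))
--     if not cands:
--         return []
--     m = max(c[0] for c in cands)
--     return [(xId, yId) for s, xId, yId in cands if s == m]
-- ===== Notes on version B (the rewrite author's own statement) =====
-- stated objective: alternative
-- what changed: Replaces A's shared decreasing pointer with running-max bookkeeping by an independent binary search over sorted y per xi that collects candidates, followed by a separate max-and-filter pass.
import Mathlib
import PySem

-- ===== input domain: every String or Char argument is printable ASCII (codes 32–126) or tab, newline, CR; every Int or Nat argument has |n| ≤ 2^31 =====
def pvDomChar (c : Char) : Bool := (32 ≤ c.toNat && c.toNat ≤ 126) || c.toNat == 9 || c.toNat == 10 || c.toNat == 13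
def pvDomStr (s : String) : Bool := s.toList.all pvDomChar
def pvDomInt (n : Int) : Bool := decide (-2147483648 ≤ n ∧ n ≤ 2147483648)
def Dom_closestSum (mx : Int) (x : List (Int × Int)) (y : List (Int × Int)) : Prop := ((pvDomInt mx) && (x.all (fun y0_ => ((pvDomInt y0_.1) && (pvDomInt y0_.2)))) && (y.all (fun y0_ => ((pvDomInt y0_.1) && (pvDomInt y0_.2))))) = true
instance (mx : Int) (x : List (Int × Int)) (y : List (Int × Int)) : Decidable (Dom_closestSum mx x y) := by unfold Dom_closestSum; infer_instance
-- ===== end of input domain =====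

-- B replaces A's shared decreasing j-pointer + running-max bookkeeping with an independent binary
-- search per xi plus a separate max-and-filter pass (same cost class; objective: alternative).
-- Both versions sort x and y in place in Python; the equivalence proved here is about the return value.

-- ===== PORT A =====

-- the 'while j >= 0 and xValue+y[j][1] > mx: j -= 1' loop; argument is j+1 as a Nat, result is the new j
def pvWhileA (mx xv : Int) (ys : List (Int × Int)) : Nat → Int
  | 0 => -1
  | n+1 => if xv + (ys.getD n (0, 0)).2 > mx then pvWhileA mx xv ys n else (n : Int)

-- the 'for xi in x' loop, state (j, currentMx, result); early 'return result' on j < 0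
def pvLoopA (mx : Int) (ys : List (Int × Int)) :
    List (Int × Int) → Int → Option Int → List (Int × Int) → List (Int × Int)
  | [], _, _, res => res
  | (xId, xv) :: rest, j, cm, res =>
    let j' := pvWhileA mx xv ys (j + 1).toNat
    if j' < 0 then res
    else
      let p := ys.getD j'.toNat (0, 0)
      let s := xv + p.2
      match cm with
      | none => pvLoopA mx ys rest j' (some s) (res ++ [(xId, p.1)])
      | some m =>
        if s = m then pvLoopA mx ys rest j' (some s) (res ++ [(xId, p.1)])
        else if s > m then pvLoopA mx ys rest j' (some s) [(xId, p.1)]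
        else pvLoopA mx ys rest j' (some m) res

def closestSum (mx : Int) (x : List (Int × Int)) (y : List (Int × Int)) : List (Int × Int) :=
  if x = [] ∨ y = [] then []
  else
    let xs := PySem.List.sorted x (fun i => i.2)
    let ys := PySem.List.sorted y (fun i => i.2)
    pvLoopA mx ys xs ((ys.length : Int) - 1) none []

-- ===== PORT B =====

-- binary search: 'while lo < hi: mid = (lo+hi)//2; …'; returns final lo = #{i | xv + ys[i].2 ≤ mx};
-- the extra fuel argument (called with hi - lo, which the interval length never exceeds) makes the
-- while-loop recursion structural
def pvCountB (mx xv : Int) (ys : List (Int × Int)) : Nat → Nat → Nat → Nat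
  | 0, lo, _ => lo
  | fuel + 1, lo, hi =>
    if lo < hi then
      let mid := (lo + hi) / 2
      if xv + (ys.getD mid (0, 0)).2 > mx then pvCountB mx xv ys fuel lo mid
      else pvCountB mx xv ys fuel (mid + 1) hi
    else lo

-- the 'for xId, xv in x' loop building cands, with 'break' when lo == 0
def pvLoopB (mx : Int) (ys : List (Int × Int)) :
    List (Int × Int) → List (Int × Int × Int) → List (Int × Int × Int)
  | [], acc => acc
  | (xId, xv) :: rest, acc =>
    let lo := pvCountB mx xv ys (ys.length) 0 ys.length
    if lo = 0 then acc
    else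
      let p := ys.getD (lo - 1) (0, 0)
      pvLoopB mx ys rest (acc ++ [(xv + p.2, xId, p.1)])

def closestSum_alt (mx : Int) (x : List (Int × Int)) (y : List (Int × Int)) : List (Int × Int) :=
  let xs := PySem.List.sorted x (fun p => p.2)
  let ys := PySem.List.sorted y (fun p => p.2)
  match pvLoopB mx ys xs [] with
  | [] => []
  | c :: cs =>
    let m := cs.foldl (fun a t => max a t.1) c.1
    ((c :: cs).filter (fun t => t.1 = m)).map (fun t => (t.2.1, t.2.2))

-- ===== PRECONDITION & SPEC =====
def Spec_closestSum (mx : Int) (x : List (Int × Int)) (y : List (Int × Int)) (out : List (Int × Int)) : Prop := out = closestSum_alt mx x y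
instance (mx : Int) (x : List (Int × Int)) (y : List (Int × Int)) (out : List (Int × Int)) : Decidable (Spec_closestSum mx x y out) := by unfold Spec_closestSum; infer_instance

-- ===== CLAIM (what is proved, stated in full; the proofs are below) =====
def Claim_equal_closestSum : Prop := ∀ (mx : Int) (x : List (Int × Int)) (y : List (Int × Int)), Dom_closestSum mx x y → Spec_closestSum mx x y (closestSum mx x y)


-- ===== LEMMAS AND PROOFS =====

-- proof-only helper: A's running-max bookkeeping, abstracted over the candidate stream
def pvRunMax : List (Int × Int × Int) → Option Int → List (Int × Int) → List (Int × Int)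
  | [], _, res => res
  | (s, a, b) :: cs, none, res => pvRunMax cs (some s) (res ++ [(a, b)])
  | (s, a, b) :: cs, some m, res =>
    if s = m then pvRunMax cs (some s) (res ++ [(a, b)])
    else if s > m then pvRunMax cs (some s) [(a, b)]
    else pvRunMax cs (some m) res

-- pvWhileA returns the unique r that is the largest valid index below n (or -1)
theorem whileA_eq (mx xv : Int) (ys : List (Int × Int)) :
    ∀ (n : Nat) (r : Int), -1 ≤ r → r < (n : Int) →
    (0 ≤ r → ¬ (xv + (ys.getD r.toNat (0, 0)).2 > mx)) →
    (∀ i : Nat, r < (i : Int) → i < n → xv + (ys.getD i (0, 0)).2 > mx) →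
    pvWhileA mx xv ys n = r := by
  intro n
  induction n with
  | zero =>
    intro r h1 h2 h3 h4
    simp only [pvWhileA]
    omega
  | succ n ih =>
    intro r h1 h2 h3 h4
    by_cases hc : xv + (ys.getD n (0, 0)).2 > mx
    · simp only [pvWhileA, if_pos hc]
      have hrn : r ≠ (n : Int) := by
        intro he
        have h5 := h3 (by omega)
        rw [he] at h5
        simp only [Int.toNat_natCast] at h5
        exact h5 hc
      exact ih r h1 (by omega) h3 (fun i hi hin => h4 i hi (by omega))
    · simp only [pvWhileA, if_neg hc]
      by_contra hne
      have hrn : r < (n : Int) := by omega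
      exact hc (h4 n hrn (Nat.lt_succ_self n))

-- binary-search invariant: pvCountB returns k with all indices < k valid and all ≥ k invalid
theorem countB_spec (mx xv : Int) (ys : List (Int × Int))
    (mono : ∀ i j : Nat, i ≤ j → j < ys.length →
      (ys.getD i (0, 0)).2 ≤ (ys.getD j (0, 0)).2) :
    ∀ (d lo hi : Nat), hi - lo ≤ d → lo ≤ hi → hi ≤ ys.length →
    (∀ i : Nat, i < lo → xv + (ys.getD i (0, 0)).2 ≤ mx) →
    (∀ i : Nat, hi ≤ i → i < ys.length → xv + (ys.getD i (0, 0)).2 > mx) →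
    lo ≤ pvCountB mx xv ys d lo hi ∧ pvCountB mx xv ys d lo hi ≤ hi ∧
    (∀ i : Nat, i < pvCountB mx xv ys d lo hi → xv + (ys.getD i (0, 0)).2 ≤ mx) ∧
    (∀ i : Nat, pvCountB mx xv ys d lo hi ≤ i → i < ys.length →
      xv + (ys.getD i (0, 0)).2 > mx) := by
  intro d
  induction d with
  | zero =>
    intro lo hi hd hlh hhl hv hinv
    have hle : hi = lo := by omega
    subst hle
    simp only [pvCountB]
    exact ⟨le_refl _, le_refl _, hv, fun i h1 h2 => hinv i h1 h2⟩
  | succ d ih =>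
    intro lo hi hd hlh hhl hv hinv
    simp only [pvCountB]
    by_cases hc : lo < hi
    · simp only [if_pos hc]
      have hm1 : lo ≤ (lo + hi) / 2 := by omega
      have hm2 : (lo + hi) / 2 < hi := by omega
      by_cases hg : xv + (ys.getD ((lo + hi) / 2) (0, 0)).2 > mx
      · simp only [if_pos hg]
        obtain ⟨c1, c2, c3, c4⟩ := ih lo ((lo + hi) / 2) (by omega) hm1 (by omega) hv
          (by intro i h1 h2; have := mono ((lo + hi) / 2) i h1 h2; omega)
        exact ⟨c1, by omega, c3, c4⟩
      · simp only [if_neg hg]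
        obtain ⟨c1, c2, c3, c4⟩ := ih ((lo + hi) / 2 + 1) hi (by omega) (by omega) hhl
          (by
            intro i h1
            by_cases hil : i < lo
            · exact hv i hil
            · have := mono i ((lo + hi) / 2) (by omega) (by omega)
              omega) hinv
        exact ⟨by omega, c2, c3, c4⟩
    · simp only [if_neg hc]
      exact ⟨le_refl _, hlh, hv, fun i h1 h2 => hinv i (by omega) h2⟩

theorem loopB_acc (mx : Int) (ys : List (Int × Int)) :
    ∀ (xs : List (Int × Int)) (acc : List (Int × Int × Int)),
    pvLoopB mx ys xs acc = acc ++ pvLoopB mx ys xs [] := by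
  intro xs
  induction xs with
  | nil => intro acc; simp [pvLoopB]
  | cons p rest ih =>
    obtain ⟨xId, xv⟩ := p
    intro acc
    simp only [pvLoopB]
    by_cases h : pvCountB mx xv ys (ys.length) 0 ys.length = 0
    · simp [h]
    · simp only [if_neg h]
      rw [ih, ih ([] ++ _)]
      simp

-- main correspondence: A's pointer loop = running max over B's candidate stream
theorem loopA_eq_runMax (mx : Int) (ys : List (Int × Int))
    (mono : ∀ i j : Nat, i ≤ j → j < ys.length →
      (ys.getD i (0, 0)).2 ≤ (ys.getD j (0, 0)).2) :
    ∀ (xs : List (Int × Int)), xs.Pairwise (fun a b => a.2 ≤ b.2) →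
    ∀ (j : Int) (cm : Option Int) (res : List (Int × Int)),
    -1 ≤ j → j < (ys.length : Int) →
    (∀ p ∈ xs, ∀ i : Nat, j < (i : Int) → i < ys.length →
      p.2 + (ys.getD i (0, 0)).2 > mx) →
    pvLoopA mx ys xs j cm res = pvRunMax (pvLoopB mx ys xs []) cm res := by
  intro xs
  induction xs with
  | nil => intro _ j cm res _ _ _; simp [pvLoopA, pvLoopB, pvRunMax]
  | cons p rest ih =>
    obtain ⟨xId, xv⟩ := p
    intro hpw j cm res h1 h2 hinv
    rw [List.pairwise_cons] at hpw
    obtain ⟨hhead, hpw'⟩ := hpw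
    obtain ⟨-, hk2, hkv, hki⟩ := countB_spec mx xv ys mono (ys.length) 0 ys.length
      (by omega) (by omega) (le_refl _) (fun i hi => absurd hi (Nat.not_lt_zero i))
      (fun i hle hlt => absurd hle (by omega))
    have hn : (((j + 1).toNat : Nat) : Int) = j + 1 := Int.toNat_of_nonneg (by omega)
    have hr : pvWhileA mx xv ys (j + 1).toNat =
        ((pvCountB mx xv ys (ys.length) 0 ys.length : Nat) : Int) - 1 := by
      apply whileA_eq
      · omega
      · rw [hn]
        by_contra hcon
        have hklen : pvCountB mx xv ys (ys.length) 0 ys.length - 1 < ys.length := by omega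
        have h5 := hinv (xId, xv) (List.mem_cons_self) (pvCountB mx xv ys (ys.length) 0 ys.length - 1)
          (by omega) hklen
        have h6 := hkv (pvCountB mx xv ys (ys.length) 0 ys.length - 1) (by omega)
        simp only at h5
        omega
      · intro h0
        have hk1 : 1 ≤ pvCountB mx xv ys (ys.length) 0 ys.length := by omega
        have h6 := hkv (pvCountB mx xv ys (ys.length) 0 ys.length - 1) (by omega)
        have h7 : (((pvCountB mx xv ys (ys.length) 0 ys.length : Nat) : Int) - 1).toNat =
            pvCountB mx xv ys (ys.length) 0 ys.length - 1 := by omega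
        rw [h7]
        omega
      · intro i hi1 hi2
        exact hki i (by omega) (by omega)
    by_cases hk0 : pvCountB mx xv ys (ys.length) 0 ys.length = 0
    · have hlt : pvWhileA mx xv ys (j + 1).toNat < 0 := by rw [hr, hk0]; simp
      simp only [pvLoopA, pvLoopB, if_pos hlt, hk0]
      simp [pvRunMax]
    · have hk1 : 1 ≤ pvCountB mx xv ys (ys.length) 0 ys.length := by omega
      have hkl : pvCountB mx xv ys (ys.length) 0 ys.length - 1 < ys.length := by omega
      have hlt : ¬ pvWhileA mx xv ys (j + 1).toNat < 0 := by rw [hr]; omega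
      have htn : (pvWhileA mx xv ys (j + 1).toNat).toNat =
          pvCountB mx xv ys (ys.length) 0 ys.length - 1 := by rw [hr]; omega
      have hinv' : ∀ p ∈ rest, ∀ i : Nat,
          ((pvCountB mx xv ys (ys.length) 0 ys.length : Nat) : Int) - 1 < (i : Int) → i < ys.length →
          p.2 + (ys.getD i (0, 0)).2 > mx := by
        intro q hq i hi1 hi2
        have hxv := hki i (by omega) hi2
        have hle := hhead q hq
        simp only at hle
        omega
      have hrec := fun cm' res' => ih hpw'
        (((pvCountB mx xv ys (ys.length) 0 ys.length : Nat) : Int) - 1) cm' res' (by omega) (by omega) hinv'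
      have hlt' : ¬ (((pvCountB mx xv ys (ys.length) 0 ys.length : Nat) : Int) - 1 < 0) := by omega
      have htn' : ((((pvCountB mx xv ys (ys.length) 0 ys.length : Nat) : Int)) - 1).toNat =
          pvCountB mx xv ys (ys.length) 0 ys.length - 1 := by omega
      simp only [pvLoopA, hr, if_neg hlt', htn', pvLoopB, if_neg hk0]
      rw [loopB_acc mx ys rest ([] ++ _)]
      simp only [List.nil_append, List.singleton_append]
      cases cm with
      | none => simp only [pvRunMax]; exact hrec _ _
      | some m =>
        by_cases hsm : xv + (ys.getD (pvCountB mx xv ys (ys.length) 0 ys.length - 1) (0, 0)).2 = m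
        · simp only [pvRunMax, if_pos hsm]; exact hrec _ _
        · by_cases hgt : xv + (ys.getD (pvCountB mx xv ys (ys.length) 0 ys.length - 1) (0, 0)).2 > m
          · simp only [pvRunMax, if_neg hsm, if_pos hgt]; exact hrec _ _
          · simp only [pvRunMax, if_neg hsm, if_neg hgt]; exact hrec _ _

theorem foldl_max_ge : ∀ (cs : List (Int × Int × Int)) (m : Int),
    m ≤ cs.foldl (fun a t => max a t.1) m := by
  intro cs
  induction cs with
  | nil => intro m; simp
  | cons c cs ih =>
    intro m
    simp only [List.foldl_cons]
    exact le_trans (le_max_left m c.1) (ih (max m c.1))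

theorem runMax_eq_filter : ∀ (cs : List (Int × Int × Int)) (m : Int) (res : List (Int × Int)),
    pvRunMax cs (some m) res =
      (if cs.foldl (fun a t => max a t.1) m = m then res else []) ++
      (cs.filter (fun t => t.1 = cs.foldl (fun a t => max a t.1) m)).map
        (fun t => (t.2.1, t.2.2)) := by
  intro cs
  induction cs with
  | nil => intro m res; simp [pvRunMax]
  | cons c cs ih =>
    obtain ⟨s, a, b⟩ := c
    intro m res
    have hM := foldl_max_ge cs (max m s)
    rcases lt_trichotomy s m with h | h | h
    · have h1 : ¬ s = m := by omega
      have h2 : ¬ s > m := by omega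
      have h3 : max m s = m := by omega
      simp only [pvRunMax, if_neg h1, if_neg h2, List.foldl_cons, h3, List.filter_cons]
      rw [ih]
      have h4 : ¬ s = cs.foldl (fun a t => max a t.1) m := by
        rw [h3] at hM; omega
      simp [h4]
    · subst h
      have h3 : max s s = s := by omega
      simp only [pvRunMax, List.foldl_cons, h3, List.filter_cons]
      rw [ih]
      by_cases h4 : cs.foldl (fun a t => max a t.1) s = s
      · simp [h4]
      · have h4' : ¬ s = cs.foldl (fun a t => max a t.1) s := fun h => h4 h.symm
        simp [h4, h4']
    · have h1 : ¬ s = m := by omega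
      have h3 : max m s = s := by omega
      simp only [pvRunMax, if_neg h1, if_pos h, List.foldl_cons, h3, List.filter_cons]
      rw [ih]
      have h5 : ¬ cs.foldl (fun a t => max a t.1) s = m := by
        rw [h3] at hM; omega
      by_cases h4 : cs.foldl (fun a t => max a t.1) s = s
      · simp [h4, h1]
      · have h4' : ¬ s = cs.foldl (fun a t => max a t.1) s := fun h => h4 h.symm
        simp [h4, h4', h5]

theorem loopB_nil_ys (mx : Int) (xs : List (Int × Int)) :
    pvLoopB mx [] xs [] = [] := by
  cases xs with
  | nil => rfl
  | cons p rest =>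
    obtain ⟨xId, xv⟩ := p
    simp only [pvLoopB]
    simp [pvCountB]

-- ===== VERDICT (by name: the statement is the Claim_ definition above) =====
theorem closestSum_spec : Claim_equal_closestSum := by
  intro mx x y _
  unfold Spec_closestSum closestSum closestSum_alt
  by_cases hxy : x = [] ∨ y = []
  · simp only [if_pos hxy]
    rcases hxy with hx | hy
    · have hx' : PySem.List.sorted x (fun p => p.2) = [] := by
        rw [PySem.List.sorted_eq_nil_iff]; exact hx
      rw [hx']
      simp [pvLoopB]
    · have hy' : PySem.List.sorted y (fun p => p.2) = [] := by
        rw [PySem.List.sorted_eq_nil_iff]; exact hy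
      rw [hy', loopB_nil_ys]
  · simp only [if_neg hxy]
    have mono : ∀ i j : Nat, i ≤ j → j < (PySem.List.sorted y (fun p => p.2)).length →
        ((PySem.List.sorted y (fun p => p.2)).getD i (0, 0)).2 ≤
        ((PySem.List.sorted y (fun p => p.2)).getD j (0, 0)).2 := by
      intro i j hij hj
      rcases Nat.lt_or_ge i j with hlt | hge
      · have hpy := PySem.List.sorted_pairwise (xs := y) (key := fun p => p.2)
        rw [List.pairwise_iff_getElem] at hpy
        have := hpy i j (by omega) hj hlt
        rw [List.getD_eq_getElem _ _ (by omega), List.getD_eq_getElem _ _ hj]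
        exact this
      · have : i = j := by omega
        rw [this]
    have hA := loopA_eq_runMax mx (PySem.List.sorted y (fun p => p.2)) mono
      (PySem.List.sorted x (fun p => p.2))
      (PySem.List.sorted_pairwise (xs := x) (key := fun p => p.2))
      (((PySem.List.sorted y (fun p => p.2)).length : Int) - 1) none []
      (by omega) (by omega)
      (fun p _ i hi1 hi2 => absurd hi2 (by omega))
    rw [hA]
    cases hc : pvLoopB mx (PySem.List.sorted y (fun p => p.2))
        (PySem.List.sorted x (fun p => p.2)) [] with
    | nil => simp [pvRunMax]
    | cons c cs =>
      obtain ⟨s, a, b⟩ := c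
      simp only [pvRunMax, List.nil_append]
      rw [runMax_eq_filter]
      have hM := foldl_max_ge cs s
      simp only [List.filter_cons]
      by_cases hMs : cs.foldl (fun a t => max a t.1) s = s
      · simp [hMs]
      · have hMs' : ¬ s = cs.foldl (fun a t => max a t.1) s := fun h => hMs h.symm
        simp [hMs, hMs']
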